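-- pv_equiv track=rewrite | github.com/wbiesmans/vpw_opgaves | 2022/cat4/waterput4/waterput.py | simuleer_tonnen
-- ===== SOURCE A (Python) =====
-- def simuleer_tonnen(west, oost, hoogte_west, hoogte_oost):
--     if oost > west:
--         oost_to_west = True
--         high = oost
--         low = west
--     else:
--         oost_to_west = False
--         high = west
--         low = oost
--
--     while high > low:
--         if high > max(hoogte_west, hoogte_oost):
--             high = high - 1
--             low = low + 1
--         else:
--             break
--
--     if high == low:
--         return "gelijk"
--     elif oost_to_west:
--         return f"{low} {high}"
--     else:
--         return f"{high} {low}"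
-- ===== SOURCE B (Python) =====
-- def simuleer_tonnen(west, oost, hoogte_west, hoogte_oost):
--     high, low = (oost, west) if oost > west else (west, oost)
--     m = max(hoogte_west, hoogte_oost)
--     d = high - low
--     if d > 0:
--         k = min((d + 1) // 2, max(0, high - m))
--         high -= k
--         low += k
--     if high == low:
--         return "gelijk"
--     return f"{low} {high}" if oost > west else f"{high} {low}"
-- ===== Notes on version B (the rewrite author's own statement) =====
-- stated objective: faster
-- what changed: replaces the step-by-step leveling while-loop by a closed-form computation of the iteration count (min of half the gap and the headroom above max height); intended as faster (measured 58.75x at the largest size, inconsistent on loop-free inputs)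
import Mathlib
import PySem

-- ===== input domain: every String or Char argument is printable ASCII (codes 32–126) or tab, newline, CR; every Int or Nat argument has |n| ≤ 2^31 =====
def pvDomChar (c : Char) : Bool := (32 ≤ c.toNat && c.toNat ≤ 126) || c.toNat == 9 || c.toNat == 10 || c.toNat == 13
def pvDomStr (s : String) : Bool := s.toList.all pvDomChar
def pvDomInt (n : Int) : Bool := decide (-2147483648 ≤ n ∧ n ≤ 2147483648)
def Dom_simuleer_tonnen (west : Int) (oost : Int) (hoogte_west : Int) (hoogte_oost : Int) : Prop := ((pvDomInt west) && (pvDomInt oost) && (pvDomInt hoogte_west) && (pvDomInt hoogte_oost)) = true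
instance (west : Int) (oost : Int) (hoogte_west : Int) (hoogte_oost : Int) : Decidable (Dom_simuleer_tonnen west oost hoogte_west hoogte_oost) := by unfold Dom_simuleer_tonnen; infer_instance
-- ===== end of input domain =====

-- B replaces A's step-by-step leveling loop by a closed-form count of iterations; intended as faster (the loop disappears); a timing run measured 58.75x at the largest size but not consistently across inputs (loop-free inputs are unchanged).

-- ===== PORT A =====
-- the while-loop of A: while high > low: if high > m: high -= 1; low += 1 else break
def pvLoopA (high low m : Int) : Int × Int :=
  if high > low then
    if high > m then pvLoopA (high - 1) (low + 1) m
    else (high, low)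
  else (high, low)
termination_by (high - low).toNat
decreasing_by omega

def simuleer_tonnen (west : Int) (oost : Int) (hoogte_west : Int) (hoogte_oost : Int) : String :=
  let otw := oost > west
  let high := if otw then oost else west
  let low := if otw then west else oost
  let hl := pvLoopA high low (max hoogte_west hoogte_oost)
  if hl.1 = hl.2 then "gelijk"
  else if otw then PySem.Int.toStr hl.2 ++ " " ++ PySem.Int.toStr hl.1
  else PySem.Int.toStr hl.1 ++ " " ++ PySem.Int.toStr hl.2

-- ===== PORT B =====
def simuleer_tonnen_alt (west : Int) (oost : Int) (hoogte_west : Int) (hoogte_oost : Int) : String :=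
  let high := if oost > west then oost else west
  let low := if oost > west then west else oost
  let m := max hoogte_west hoogte_oost
  let d := high - low
  let k := if d > 0 then min (PySem.Int.floordiv (d + 1) 2) (max 0 (high - m)) else 0
  let high := high - k
  let low := low + k
  if high = low then "gelijk"
  else if oost > west then PySem.Int.toStr low ++ " " ++ PySem.Int.toStr high
  else PySem.Int.toStr high ++ " " ++ PySem.Int.toStr low

-- ===== PRECONDITION & SPEC =====
def Spec_simuleer_tonnen (west : Int) (oost : Int) (hoogte_west : Int) (hoogte_oost : Int) (out : String) : Prop := out = simuleer_tonnen_alt west oost hoogte_west hoogte_oost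
instance (west : Int) (oost : Int) (hoogte_west : Int) (hoogte_oost : Int) (out : String) : Decidable (Spec_simuleer_tonnen west oost hoogte_west hoogte_oost out) := by unfold Spec_simuleer_tonnen; infer_instance

-- ===== CLAIM (what is proved, stated in full; the proofs are below) =====
def Claim_equal_simuleer_tonnen : Prop := ∀ (west : Int) (oost : Int) (hoogte_west : Int) (hoogte_oost : Int), Dom_simuleer_tonnen west oost hoogte_west hoogte_oost → Spec_simuleer_tonnen west oost hoogte_west hoogte_oost (simuleer_tonnen west oost hoogte_west hoogte_oost)

-- ===== LEMMAS AND PROOFS =====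

-- closed form for A's loop: it runs min(⌈(high-low)/2⌉, high-m) iterations (0 if high ≤ low)
theorem pvLoopA_closed (high low m : Int) :
    pvLoopA high low m =
      (high - (if high - low > 0 then min (PySem.Int.floordiv (high - low + 1) 2) (max 0 (high - m)) else 0),
       low + (if high - low > 0 then min (PySem.Int.floordiv (high - low + 1) 2) (max 0 (high - m)) else 0)) := by
  fun_induction pvLoopA with
  | case1 high low hgt hm ih =>
    rw [ih]
    have h1 : PySem.Int.floordiv (high - low + 1) 2 = (high - low + 1) / 2 :=
      PySem.Int.floordiv_eq_ediv_of_pos (by omega)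
    have h2 : PySem.Int.floordiv (high - 1 - (low + 1) + 1) 2 = (high - 1 - (low + 1) + 1) / 2 :=
      PySem.Int.floordiv_eq_ediv_of_pos (by omega)
    rw [h1, h2]
    simp only [min_def, max_def]
    split_ifs <;> simp only [Prod.mk.injEq] <;> omega
  | case2 high low hgt hm =>
    have h1 : PySem.Int.floordiv (high - low + 1) 2 = (high - low + 1) / 2 :=
      PySem.Int.floordiv_eq_ediv_of_pos (by omega)
    rw [h1]
    simp only [min_def, max_def]
    split_ifs <;> simp only [Prod.mk.injEq] <;> omega
  | case3 high low hle =>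
    simp only [if_neg (by omega : ¬ high - low > 0)]
    simp only [Prod.mk.injEq]; omega

-- ===== VERDICT (by name: the statement is the Claim_ definition above) =====
theorem simuleer_tonnen_spec : Claim_equal_simuleer_tonnen := by
  intro west oost hw ho _
  unfold Spec_simuleer_tonnen simuleer_tonnen simuleer_tonnen_alt
  simp only [pvLoopA_closed]
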